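-- pv_equiv track=rewrite | github.com/leprohonmalo/projet_court | src/toto.py | combine_element
-- ===== SOURCE A (Python) =====
-- from copy import deepcopy
--
-- def combine_element(
--     listi, replacement=True, order=True
-- ):
--     """ This function returns a list of string representing all possible couple combinations of every element of listi.
--     Elements of a couple are separated by a ":".
--
--     Parameters:
--
--         listi : a list of elements
--
--         replacement : a boolean, define if combinations of the same item are possible
--
--         order : a boolean, define if items oder in a combination matters (for instance ab != ba)
--
--     Output:
--
--         list_fini : a list of string representing all possible couple combinations of every element of listi.
--     """
--     # Flag that indicate the state of the replacement parameter for one part of the function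
--     if replacement:
--         lever = 0
--     else:
--         lever = 1
--     list_ini = deepcopy(listi)
--     list_fini = []
--
--     # Part where orders matters (this is the case for PB combination)
--     if order :
--         for i in range(len(list_ini)):
--             for j in range(len(list_ini)):
--                 #Avoid repetition in a combination, but not needed for PB
--                 if (not replacement
--                     and list_ini[i] == list_ini[j]):
--                         continue
--                 list_fini.append(str(list_ini[i]) + ":" + str(list_ini[j]))
--
--     #The first item of the list here is deleted at each iteration to avoid repetion of
--     # combination with different order (a:c happens, c:a never happens because a is deleted
--     # afterwards)
--     else:
--         while len(list_ini) > 0: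
--             for i in range(len(list_ini) - lever):
--                 list_fini.append(str(list_ini[0]) + ":" + str(list_ini[i + lever]))
--             del list_ini[0]
--
--     return list_fini
-- ===== SOURCE B (Python) =====
-- from itertools import product, combinations, combinations_with_replacement
--
-- def combine_element(listi, replacement=True, order=True):
--     if order:
--         pairs = product(listi, repeat=2)
--         if not replacement:
--             pairs = (p for p in pairs if p[0] != p[1])
--     elif replacement:
--         pairs = combinations_with_replacement(listi, 2)
--     else:
--         pairs = combinations(listi, 2)
--     return [str(a) + ":" + str(b) for a, b in pairs]
-- ===== Notes on version B (the rewrite author's own statement) =====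
-- stated objective: idiomatic
-- what changed: Replaces the deepcopy, the lever flag and the del-based shrinking-list while loop with itertools (product / combinations / combinations_with_replacement), filtering product on value inequality for order=True without replacement.
import Mathlib
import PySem

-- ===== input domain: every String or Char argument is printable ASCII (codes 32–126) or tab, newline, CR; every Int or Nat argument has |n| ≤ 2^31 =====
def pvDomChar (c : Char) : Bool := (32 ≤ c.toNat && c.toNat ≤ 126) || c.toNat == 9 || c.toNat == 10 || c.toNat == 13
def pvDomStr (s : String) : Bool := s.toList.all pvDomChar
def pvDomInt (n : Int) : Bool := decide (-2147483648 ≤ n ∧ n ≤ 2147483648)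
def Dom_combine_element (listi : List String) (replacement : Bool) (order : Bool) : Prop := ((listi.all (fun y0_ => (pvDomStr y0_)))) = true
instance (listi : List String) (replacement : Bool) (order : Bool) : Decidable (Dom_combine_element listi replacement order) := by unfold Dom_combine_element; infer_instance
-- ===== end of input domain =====

-- B replaces A's deepcopy, lever flag and del-based while loop with itertools-style pair generation (idiomatic; same output).


-- ===== PORT A =====
-- A's while-loop: deletes the head each iteration; lever = 0/1 offset for the inner index loop
def combineWhileA : List String → Nat → List String → List String
  | [], _, acc => acc
  | x :: rest, lever, acc =>
    combineWhileA rest lever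
      (acc ++ (List.range ((x :: rest).length - lever)).map
        (fun i => x ++ ":" ++ (x :: rest).getD (i + lever) ""))

def combine_element (listi : List String) (replacement : Bool) (order : Bool) : List String :=
  let lever : Nat := if replacement then 0 else 1
  let list_ini := listi
  if order then
    (List.range list_ini.length).foldl (fun acc i =>
      (List.range list_ini.length).foldl (fun acc j =>
        if replacement = false ∧ list_ini.getD i "" = list_ini.getD j "" then acc
        else acc ++ [list_ini.getD i "" ++ ":" ++ list_ini.getD j ""]) acc) []
  else
    combineWhileA list_ini lever []

-- ===== PORT B =====
-- itertools.combinations_with_replacement(l, 2) as a pair list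
def cwrPairsB : List String → List (String × String)
  | [] => []
  | x :: rest => ((x :: rest).map (fun b => (x, b))) ++ cwrPairsB rest

-- itertools.combinations(l, 2) as a pair list
def combPairsB : List String → List (String × String)
  | [] => []
  | x :: rest => (rest.map (fun b => (x, b))) ++ combPairsB rest

def combine_element_alt (listi : List String) (replacement : Bool) (order : Bool) : List String :=
  let pairs : List (String × String) :=
    if order then
      let ps := listi.flatMap (fun a => listi.map (fun b => (a, b)))
      if replacement then ps else ps.filter (fun p => p.1 ≠ p.2)
    else if replacement then cwrPairsB listi
    else combPairsB listi
  pairs.map (fun p => p.1 ++ ":" ++ p.2)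

-- ===== PRECONDITION & SPEC =====
def Spec_combine_element (listi : List String) (replacement : Bool) (order : Bool) (out : List String) : Prop := out = combine_element_alt listi replacement order
instance (listi : List String) (replacement : Bool) (order : Bool) (out : List String) : Decidable (Spec_combine_element listi replacement order out) := by unfold Spec_combine_element; infer_instance

-- ===== CLAIM (what is proved, stated in full; the proofs are below) =====
def Claim_equal_combine_element : Prop := ∀ (listi : List String) (replacement : Bool) (order : Bool), Dom_combine_element listi replacement order → Spec_combine_element listi replacement order (combine_element listi replacement order)

-- ===== LEMMAS AND PROOFS =====


theorem foldl_range_getD {β : Type} (l : List String) (f : List β → String → List β) (init : List β) :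
    (List.range l.length).foldl (fun acc i => f acc (l.getD i "")) init = l.foldl f init := by
  induction l generalizing init with
  | nil => rfl
  | cons x rest ih =>
    simp only [List.length_cons, List.range_succ_eq_map, List.foldl_cons, List.foldl_map,
      List.getD_cons_zero, List.getD_cons_succ]
    exact ih (f init x)

theorem range_map_getD {β : Type} (l : List String) (g : String → β) :
    (List.range l.length).map (fun i => g (l.getD i "")) = l.map g := by
  induction l with
  | nil => rfl
  | cons x rest ih =>
    simp only [List.length_cons, List.range_succ_eq_map, List.map_cons, List.map_map]
    exact congrArg _ ih

theorem range_map_getD_succ {β : Type} (x : String) (rest : List String) (g : String → β) :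
    (List.range rest.length).map (fun i => g ((x :: rest).getD (i + 1) "")) = rest.map g := by
  simpa using range_map_getD rest g

theorem whileA_zero (l : List String) (acc : List String) :
    combineWhileA l 0 acc = acc ++ (cwrPairsB l).map (fun p => p.1 ++ ":" ++ p.2) := by
  induction l generalizing acc with
  | nil => simp [combineWhileA, cwrPairsB]
  | cons x rest ih =>
    rw [combineWhileA, ih]
    have h : (List.range ((x :: rest).length - 0)).map
        (fun i => x ++ ":" ++ (x :: rest).getD (i + 0) "") =
        ((x :: rest).map (fun b => (x, b))).map (fun p => p.1 ++ ":" ++ p.2) := by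
      simpa using range_map_getD (x :: rest) (fun b => x ++ ":" ++ b)
    rw [h]
    simp [cwrPairsB]

theorem whileA_one (l : List String) (acc : List String) :
    combineWhileA l 1 acc = acc ++ (combPairsB l).map (fun p => p.1 ++ ":" ++ p.2) := by
  induction l generalizing acc with
  | nil => simp [combineWhileA, combPairsB]
  | cons x rest ih =>
    rw [combineWhileA, ih]
    have h : (List.range ((x :: rest).length - 1)).map
        (fun i => x ++ ":" ++ (x :: rest).getD (i + 1) "") =
        (rest.map (fun b => (x, b))).map (fun p => p.1 ++ ":" ++ p.2) := by
      simpa using range_map_getD_succ x rest (fun b => x ++ ":" ++ b)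
    rw [h]
    simp [combPairsB]

theorem filter_flatMap {α β : Type} (l : List α) (f : α → List β) (q : β → Bool) :
    (l.flatMap f).filter q = l.flatMap (fun a => (f a).filter q) := by
  induction l with
  | nil => rfl
  | cons x rest ih => simp [List.flatMap_cons, List.filter_append, ih]

-- ===== VERDICT (by name: the statement is the Claim_ definition above) =====
theorem combine_element_spec : Claim_equal_combine_element := by
  intro listi replacement order _
  unfold Spec_combine_element combine_element combine_element_alt
  cases order with
  | false =>
    cases replacement with
    | true => simpa using whileA_zero listi []
    | false => simpa using whileA_one listi []
  | true =>
    cases replacement with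
    | true =>
      simp only [if_true, Bool.true_eq_false, false_and, if_false]
      rw [foldl_range_getD listi
        (fun acc a => (List.range listi.length).foldl
          (fun acc j => acc ++ [a ++ ":" ++ listi.getD j ""]) acc) []]
      have hinner : ∀ (a : String) (acc : List String),
          (List.range listi.length).foldl (fun acc j => acc ++ [a ++ ":" ++ listi.getD j ""]) acc
            = acc ++ listi.map (fun b => a ++ ":" ++ b) := by
        intro a acc
        rw [foldl_range_getD listi (fun acc b => acc ++ [a ++ ":" ++ b]) acc]
        rw [PySem.List.foldl_append_singleton_eq_map]
      simp only [hinner]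
      rw [PySem.List.foldl_append_eq_flatMap]
      simp [List.map_flatMap, Function.comp_def]
    | false =>
      simp only [if_true, true_and]
      rw [foldl_range_getD listi
        (fun acc a => (List.range listi.length).foldl
          (fun acc j => if a = listi.getD j "" then acc else acc ++ [a ++ ":" ++ listi.getD j ""]) acc) []]
      have hinner : ∀ (a : String) (acc : List String),
          (List.range listi.length).foldl
            (fun acc j => if a = listi.getD j "" then acc else acc ++ [a ++ ":" ++ listi.getD j ""]) acc
            = acc ++ (listi.filter (fun b => decide (a ≠ b))).map (fun b => a ++ ":" ++ b) := by
        intro a acc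
        rw [foldl_range_getD listi
          (fun acc b => if a = b then acc else acc ++ [a ++ ":" ++ b]) acc]
        rw [show (fun (acc : List String) (b : String) => if a = b then acc else acc ++ [a ++ ":" ++ b])
            = (fun acc b => if decide (a ≠ b) then acc ++ [a ++ ":" ++ b] else acc) from by
          funext acc2 b; by_cases h : a = b <;> simp [h]]
        rw [PySem.List.foldl_append_if]
      simp only [hinner]
      rw [PySem.List.foldl_append_eq_flatMap]
      rw [filter_flatMap]
      simp [List.map_flatMap, List.filter_map, Function.comp_def]
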